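-- pv_equiv track=rewrite | github.com/AITCX08/Distill-Anyone | main.py | parse_stages
-- ===== SOURCE A (Python) =====
-- def parse_stages(stages_str: str) -> list[int]:
--     """
--     解析阶段选择字符串。
--
--     支持格式:
--       - "1,2,3"    → [1, 2, 3]
--       - "3-5"      → [3, 4, 5]
--       - "1,3-5"    → [1, 3, 4, 5]
--       - "all"      → [1, 2, 3, 4, 5]
--
--     Returns:
--         排序后的阶段编号列表
--     """
--     if stages_str.strip().lower() == "all":
--         return [1, 2, 3, 4, 5]
--
--     result = set()
--     for part in stages_str.split(","):
--         part = part.strip()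
--         if "-" in part:
--             start, end = part.split("-", 1)
--             for i in range(int(start), int(end) + 1):
--                 if 1 <= i <= 5:
--                     result.add(i)
--         else:
--             val = int(part)
--             if 1 <= val <= 5:
--                 result.add(val)
--     return sorted(result)
-- ===== SOURCE B (Python) =====
-- def parse_stages(stages_str: str) -> list[int]:
--     if stages_str.strip().lower() == "all":
--         return [1, 2, 3, 4, 5]
--
--     intervals = []
--     for part in stages_str.split(","):
--         part = part.strip()
--         if "-" in part:
--             start, end = part.split("-", 1)
--             intervals.append((int(start), int(end)))
--         else:
--             v = int(part)
--             intervals.append((v, v))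
--     return [i for i in range(1, 6) if any(lo <= i <= hi for lo, hi in intervals)]
-- ===== Notes on version B (the rewrite author's own statement) =====
-- stated objective: alternative
-- what changed: B collects each comma part as a (lo,hi) interval pair and emits the result with one ordered scan of the fixed domain 1..5 testing interval coverage, instead of A's per-part iteration over range(start,end+1) into a set followed by sorted().
import Mathlib
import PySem

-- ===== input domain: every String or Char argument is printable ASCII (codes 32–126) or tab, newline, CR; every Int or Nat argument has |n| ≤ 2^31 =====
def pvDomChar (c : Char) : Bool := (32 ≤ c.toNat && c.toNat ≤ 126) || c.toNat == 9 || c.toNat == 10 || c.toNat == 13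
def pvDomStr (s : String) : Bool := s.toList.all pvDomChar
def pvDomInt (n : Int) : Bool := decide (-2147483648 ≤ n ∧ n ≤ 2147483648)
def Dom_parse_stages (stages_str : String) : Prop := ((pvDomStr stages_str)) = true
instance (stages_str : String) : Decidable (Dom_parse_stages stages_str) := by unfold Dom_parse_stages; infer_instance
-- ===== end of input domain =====

-- B replaces A's per-part range loop + set + sort by a list of (lo,hi) interval pairs and one
-- ordered scan of the fixed domain 1..5 (objective: alternative decomposition; no set, no sort).

-- ===== PORT A =====
def parse_stages (stages_str : String) : List Int :=
  if PySem.Str.lower (PySem.Str.strip stages_str) = "all" then [1, 2, 3, 4, 5]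
  else
    let result : PySem.Set Int :=
      ((PySem.Str.split? stages_str ",").getD []).foldl (fun acc part =>
        if PySem.Str.isIn "-" (PySem.Str.strip part) then
          match PySem.Str.splitMax? (PySem.Str.strip part) "-" 1 with
          | some [a, b] =>
            match PySem.Int.ofStr? a, PySem.Int.ofStr? b with
            | some s, some e =>
                (PySem.List.pyRange s (e + 1) 1).foldl
                  (fun acc i => if 1 ≤ i ∧ i ≤ 5 then acc.add i else acc) acc
            | _, _ => acc          -- int() raises ValueError here: excluded by Pre_
          | _ => acc               -- unreachable: split('-',1) with '-' present gives 2 pieces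
        else
          match PySem.Int.ofStr? (PySem.Str.strip part) with
          | some v => if 1 ≤ v ∧ v ≤ 5 then acc.add v else acc
          | none => acc            -- int() raises ValueError here: excluded by Pre_
        ) PySem.Set.empty
    PySem.List.sorted result (fun x => x) false

-- ===== PORT B =====
def parse_stages_alt (stages_str : String) : List Int :=
  if PySem.Str.lower (PySem.Str.strip stages_str) = "all" then [1, 2, 3, 4, 5]
  else
    let intervals : List (Int × Int) :=
      ((PySem.Str.split? stages_str ",").getD []).foldl (fun acc part =>
        if PySem.Str.isIn "-" (PySem.Str.strip part) then
          let pieces := (PySem.Str.splitMax? (PySem.Str.strip part) "-" 1).getD []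
          -- split('-', 1) with '-' present yields exactly [start, end]
          if pieces.length == 2 then
            ((PySem.Int.ofStr? (pieces.headD "")).bind fun s =>
              (PySem.Int.ofStr? (pieces.getD 1 "")).map fun e => (s, e)).elim
              acc (fun iv => acc ++ [iv])   -- none = int() ValueError: excluded by Pre_
          else acc
        else
          (PySem.Int.ofStr? (PySem.Str.strip part)).elim
            acc (fun v => acc ++ [(v, v)])  -- none = int() ValueError: excluded by Pre_
        ) []
    (PySem.List.pyRange 1 6 1).filter
      (fun i => intervals.any (fun p => decide (p.1 ≤ i) && decide (i ≤ p.2)))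

-- ===== PRECONDITION & SPEC =====
-- Pre_ excludes exactly the inputs where A raises ValueError: some comma-separated part
-- (when the "all" short-circuit does not fire) whose int() conversion(s) fail.
def pvPartOK (part : String) : Bool :=
  if PySem.Str.isIn "-" (PySem.Str.strip part) then
    let pieces := (PySem.Str.splitMax? (PySem.Str.strip part) "-" 1).getD []
    pieces.length == 2 && (PySem.Int.ofStr? (pieces.headD "")).isSome
      && (PySem.Int.ofStr? (pieces.getD 1 "")).isSome
  else (PySem.Int.ofStr? (PySem.Str.strip part)).isSome

def Pre_parse_stages (stages_str : String) : Prop :=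
  PySem.Str.lower (PySem.Str.strip stages_str) = "all" ∨
  ∀ part ∈ (PySem.Str.split? stages_str ",").getD [], pvPartOK part = true
instance (stages_str : String) : Decidable (Pre_parse_stages stages_str) := by
  unfold Pre_parse_stages; infer_instance

def pvWitness_parse_stages : String := "1,3-5"

def Spec_parse_stages (stages_str : String) (out : List Int) : Prop := out = parse_stages_alt stages_str
instance (stages_str : String) (out : List Int) : Decidable (Spec_parse_stages stages_str out) := by unfold Spec_parse_stages; infer_instance

-- ===== CLAIM (what is proved, stated in full; the proofs are below) =====
def Claim_equal_parse_stages : Prop := ∀ (stages_str : String), Dom_parse_stages stages_str → Pre_parse_stages stages_str → Spec_parse_stages stages_str (parse_stages stages_str)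

-- ===== LEMMAS AND PROOFS =====

-- the candidate values A's loop body enumerates for one part
def pvCands (part : String) : List Int :=
  if PySem.Str.isIn "-" (PySem.Str.strip part) then
    match PySem.Str.splitMax? (PySem.Str.strip part) "-" 1 with
    | none => []
    | some [a, b] =>
      match PySem.Int.ofStr? a, PySem.Int.ofStr? b with
      | none, _ => []
      | _, none => []
      | some s, some e => PySem.List.pyRange s (e + 1) 1
    | some _ => []
  else
    match PySem.Int.ofStr? (PySem.Str.strip part) with
    | none => []
    | some v => [v]

-- the interval(s) B's loop body records for one part
def pvIv (part : String) : List (Int × Int) :=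
  if PySem.Str.isIn "-" (PySem.Str.strip part) then
    let pieces := (PySem.Str.splitMax? (PySem.Str.strip part) "-" 1).getD []
    if pieces.length == 2 then
      match PySem.Int.ofStr? (pieces.headD ""), PySem.Int.ofStr? (pieces.getD 1 "") with
      | some s, some e => [(s, e)]
      | _, _ => []
    else []
  else
    match PySem.Int.ofStr? (PySem.Str.strip part) with
    | none => []
    | some v => [(v, v)]

theorem pvCands_covered (part : String) (i : Int) :
    (i ∈ pvCands part) ↔ ∃ p ∈ pvIv part, p.1 ≤ i ∧ i ≤ p.2 := by
  unfold pvCands pvIv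
  by_cases hin : PySem.Str.isIn "-" (PySem.Str.strip part) = true
  · simp only [if_pos hin]
    cases hsp : PySem.Str.splitMax? (PySem.Str.strip part) "-" 1 with
    | none => simp
    | some l =>
      rcases l with _ | ⟨a, _ | ⟨b, _ | ⟨c, t⟩⟩⟩
      · simp
      · simp
      · cases ha : PySem.Int.ofStr? a with
        | none => simp [ha]
        | some s =>
          cases hb : PySem.Int.ofStr? b with
          | none => simp [ha, hb]
          | some e =>
            simp only [ha, hb, Option.getD_some, List.headD, List.getD, List.length,
              beq_self_eq_true, if_true, PySem.List.mem_pyRange_one, List.mem_singleton,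
              List.getElem?_cons_succ, List.getElem?_cons_zero, Option.getD_some]
            constructor
            · rintro ⟨h1, h2⟩; exact ⟨(s, e), by simp, h1, by omega⟩
            · rintro ⟨p, hp, h1, h2⟩
              subst hp
              exact ⟨h1, by omega⟩
      · simp
  · simp only [if_neg hin]
    cases h : PySem.Int.ofStr? (PySem.Str.strip part) with
    | none => simp
    | some v =>
      simp only [List.mem_singleton]
      constructor
      · intro hv
        exact ⟨(v, v), by simp, by omega, by omega⟩
      · rintro ⟨p, hp, h1, h2⟩
        subst hp
        omega

-- A's loop body, written as a fold of the add-if-in-range step over pvCands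
theorem pvA_step (acc : PySem.Set Int) (part : String) :
    (if PySem.Str.isIn "-" (PySem.Str.strip part) then
      match PySem.Str.splitMax? (PySem.Str.strip part) "-" 1 with
      | some [a, b] =>
        match PySem.Int.ofStr? a, PySem.Int.ofStr? b with
        | some s, some e =>
            (PySem.List.pyRange s (e + 1) 1).foldl
              (fun acc i => if 1 ≤ i ∧ i ≤ 5 then acc.add i else acc) acc
        | _, _ => acc
      | _ => acc
     else
      match PySem.Int.ofStr? (PySem.Str.strip part) with
      | some v => if 1 ≤ v ∧ v ≤ 5 then acc.add v else acc
      | none => acc)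
    = (pvCands part).foldl (fun acc i => if 1 ≤ i ∧ i ≤ 5 then acc.add i else acc) acc := by
  unfold pvCands
  by_cases hin : PySem.Str.isIn "-" (PySem.Str.strip part) = true
  · simp only [if_pos hin]
    cases hsp : PySem.Str.splitMax? (PySem.Str.strip part) "-" 1 with
    | none => rfl
    | some l =>
      rcases l with _ | ⟨a, _ | ⟨b, _ | ⟨c, t⟩⟩⟩
      · rfl
      · rfl
      · cases ha : PySem.Int.ofStr? a with
        | none => simp [ha]
        | some s =>
          cases hb : PySem.Int.ofStr? b with
          | none => simp [ha, hb]
          | some e => simp [ha, hb]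
      · rfl
  · simp only [if_neg hin]
    cases h : PySem.Int.ofStr? (PySem.Str.strip part) with
    | none => rfl
    | some v => rfl

-- A's whole loop = one fold over the concatenation of all candidates
theorem pvA_loop (parts : List String) (acc : PySem.Set Int) :
    parts.foldl (fun acc part =>
        if PySem.Str.isIn "-" (PySem.Str.strip part) then
          match PySem.Str.splitMax? (PySem.Str.strip part) "-" 1 with
          | some [a, b] =>
            match PySem.Int.ofStr? a, PySem.Int.ofStr? b with
            | some s, some e =>
                (PySem.List.pyRange s (e + 1) 1).foldl
                  (fun acc i => if 1 ≤ i ∧ i ≤ 5 then acc.add i else acc) acc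
            | _, _ => acc
          | _ => acc
        else
          match PySem.Int.ofStr? (PySem.Str.strip part) with
          | some v => if 1 ≤ v ∧ v ≤ 5 then acc.add v else acc
          | none => acc) acc
    = (parts.flatMap pvCands).foldl
        (fun acc i => if 1 ≤ i ∧ i ≤ 5 then acc.add i else acc) acc := by
  induction parts generalizing acc with
  | nil => rfl
  | cons p t ih =>
    simp only [List.foldl_cons, List.flatMap_cons, List.foldl_append]
    rw [pvA_step, ih]

-- B's loop body appends pvIv part
theorem pvB_step (acc : List (Int × Int)) (part : String) :
    (if PySem.Str.isIn "-" (PySem.Str.strip part) then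
      let pieces := (PySem.Str.splitMax? (PySem.Str.strip part) "-" 1).getD []
      if pieces.length == 2 then
        ((PySem.Int.ofStr? (pieces.headD "")).bind fun s =>
          (PySem.Int.ofStr? (pieces.getD 1 "")).map fun e => (s, e)).elim
          acc (fun iv => acc ++ [iv])
      else acc
     else
      (PySem.Int.ofStr? (PySem.Str.strip part)).elim
        acc (fun v => acc ++ [(v, v)]))
    = acc ++ pvIv part := by
  unfold pvIv
  by_cases hin : PySem.Str.isIn "-" (PySem.Str.strip part) = true
  · simp only [if_pos hin]
    by_cases h2 : ((PySem.Str.splitMax? (PySem.Str.strip part) "-" 1).getD []).length == 2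
    · simp only [h2, if_true]
      cases ha : PySem.Int.ofStr? (((PySem.Str.splitMax? (PySem.Str.strip part) "-" 1).getD []).headD "") with
      | none => simp
      | some s =>
        cases hb : PySem.Int.ofStr? (((PySem.Str.splitMax? (PySem.Str.strip part) "-" 1).getD []).getD 1 "") with
        | none => simp
        | some e => simp
    · simp only [Bool.not_eq_true] at h2
      simp [h2]
  · simp only [if_neg hin]
    cases h : PySem.Int.ofStr? (PySem.Str.strip part) with
    | none => simp
    | some v => simp

-- B's whole loop = the concatenation of all intervals
theorem pvB_loop (parts : List String) (acc : List (Int × Int)) :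
    parts.foldl (fun acc part =>
        if PySem.Str.isIn "-" (PySem.Str.strip part) then
          let pieces := (PySem.Str.splitMax? (PySem.Str.strip part) "-" 1).getD []
          if pieces.length == 2 then
            ((PySem.Int.ofStr? (pieces.headD "")).bind fun s =>
              (PySem.Int.ofStr? (pieces.getD 1 "")).map fun e => (s, e)).elim
              acc (fun iv => acc ++ [iv])
          else acc
        else
          (PySem.Int.ofStr? (PySem.Str.strip part)).elim
            acc (fun v => acc ++ [(v, v)])) acc
    = acc ++ parts.flatMap pvIv := by
  induction parts generalizing acc with
  | nil => simp
  | cons p t ih =>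
    rw [List.foldl_cons, pvB_step, ih, List.flatMap_cons, List.append_assoc]

theorem pvMem_addLoop (l : List Int) (s0 : PySem.Set Int) (i : Int) :
    (i ∈ l.foldl (fun acc x => if 1 ≤ x ∧ x ≤ 5 then acc.add x else acc) s0) ↔
      i ∈ s0 ∨ (i ∈ l ∧ 1 ≤ i ∧ i ≤ 5) := by
  induction l generalizing s0 with
  | nil => simp
  | cons x t ih =>
    simp only [List.foldl_cons, List.mem_cons]
    by_cases hx : 1 ≤ x ∧ x ≤ 5
    · rw [if_pos hx, ih, PySem.Set.mem_add]
      constructor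
      · rintro ((h | rfl) | ⟨ht, h5⟩)
        · exact Or.inl h
        · exact Or.inr ⟨Or.inl rfl, hx⟩
        · exact Or.inr ⟨Or.inr ht, h5⟩
      · rintro (h | ⟨(rfl | ht), h5⟩)
        · exact Or.inl (Or.inl h)
        · exact Or.inl (Or.inr rfl)
        · exact Or.inr ⟨ht, h5⟩
    · rw [if_neg hx, ih]
      constructor
      · rintro (h | ⟨ht, h5⟩)
        · exact Or.inl h
        · exact Or.inr ⟨Or.inr ht, h5⟩
      · rintro (h | ⟨(rfl | ht), h5⟩)
        · exact Or.inl h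
        · exact absurd h5 hx
        · exact Or.inr ⟨ht, h5⟩

theorem pvNodup_addLoop (l : List Int) (s0 : PySem.Set Int) (h : s0.Nodup) :
    (l.foldl (fun acc x => if 1 ≤ x ∧ x ≤ 5 then acc.add x else acc) s0).Nodup := by
  induction l generalizing s0 with
  | nil => exact h
  | cons x t ih =>
    simp only [List.foldl_cons]
    split
    · exact ih _ (PySem.Set.nodup_add s0 x h)
    · exact ih _ h

theorem parse_stages_eq_alt (stages_str : String) :
    parse_stages stages_str = parse_stages_alt stages_str := by
  unfold parse_stages parse_stages_alt
  split
  · rfl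
  · rw [pvA_loop, pvB_loop, List.nil_append]
    set parts := (PySem.Str.split? stages_str ",").getD []
    apply PySem.List.sorted_id_eq_of_perm_of_pairwise
    · rw [List.perm_ext_iff_of_nodup]
      · intro i
        rw [List.mem_filter, pvMem_addLoop]
        simp only [PySem.Set.empty, List.not_mem_nil, false_or,
          PySem.List.mem_pyRange_one, List.any_eq_true, decide_eq_true_eq,
          Bool.and_eq_true, List.mem_flatMap]
        constructor
        · intro h
          obtain ⟨h16, q, hq, hlo, hhi⟩ := h
          obtain ⟨p, hp, hqm⟩ := hq
          exact ⟨⟨p, hp, (pvCands_covered _ i).mpr ⟨q, hqm, hlo, hhi⟩⟩, by omega⟩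
        · intro h
          obtain ⟨⟨p, hp, hq⟩, h5⟩ := h
          obtain ⟨q, hqm, hlo, hhi⟩ := (pvCands_covered _ i).mp hq
          exact ⟨⟨by omega, by omega⟩, q, ⟨p, hp, hqm⟩, hlo, hhi⟩
      · exact (PySem.List.nodup_pyRange_one 1 6).filter _
      · exact pvNodup_addLoop _ _ List.nodup_nil
    · exact List.Pairwise.filter _
        ((PySem.List.pairwise_lt_pyRange_one 1 6).imp le_of_lt)

-- ===== VERDICT (by name: the statement is the Claim_ definition above) =====
theorem parse_stages_spec : Claim_equal_parse_stages := by
  intro s _ _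
  unfold Spec_parse_stages
  exact parse_stages_eq_alt s
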